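-- pv_equiv track=rewrite | github.com/impish0/tailoza | templates.py | _render_page_numbers
-- ===== SOURCE A (Python) =====
-- MAX_PAGES_SHOW_ALL = 7  # Show all page numbers when total pages <= this value
--
-- PAGES_NEAR_EDGE = 3     # How close to start/end to trigger edge display mode
--
-- def _build_pagination_url(page_num, current_page, is_category_page):
--     """Build the URL for a specific page number.
--
--     Args:
--         page_num: The page number to link to
--         current_page: The current page being viewed
--         is_category_page: True for category pages, False for index pages
--
--     Returns:
--         Relative URL string for the page
--     """
--     is_on_first_page = current_page == 1
--
--     if page_num == 1:
--         # Link to first/index page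
--         if is_category_page:
--             return "../"
--         return "index.html" if is_on_first_page else "../../index.html"
--
--     # Link to numbered page (page 2+)
--     if is_on_first_page:
--         return f"../../page/{page_num}/"
--     return f"../{page_num}/"
--
-- def _render_page_link(page_num, current_page, url):
--     """Render a single page link or current page indicator."""
--     if page_num == current_page:
--         return f'<span class="pagination-current">{page_num}</span>'
--     return f'<a href="{url}">{page_num}</a>'
--
-- def _render_page_numbers(current, total, is_category_page):
--     """Generate page number elements with ellipsis where appropriate.
--
--     Returns a list of HTML strings for page numbers and ellipsis.
--     """
--     def link(page_num):
--         url = _build_pagination_url(page_num, current, is_category_page)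
--         return _render_page_link(page_num, current, url)
--
--     ellipsis = '<span class="pagination-ellipsis">…</span>'
--
--     # Show all pages when there are few enough
--     if total <= MAX_PAGES_SHOW_ALL:
--         return [link(i) for i in range(1, total + 1)]
--
--     # Near beginning: [1] [2] [3] [4] ... [last]
--     if current <= PAGES_NEAR_EDGE:
--         return [link(i) for i in range(1, 5)] + [ellipsis, link(total)]
--
--     # Near end: [1] ... [last-3] [last-2] [last-1] [last]
--     if current >= total - PAGES_NEAR_EDGE + 1:
--         return [link(1), ellipsis] + [link(i) for i in range(total - 3, total + 1)]
--
--     # Middle: [1] ... [curr-1] [curr] [curr+1] ... [last]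
--     return [link(1), ellipsis] + [link(i) for i in range(current - 1, current + 2)] + [ellipsis, link(total)]
-- ===== SOURCE B (Python) =====
-- MAX_PAGES_SHOW_ALL = 7  # Show all page numbers when total pages <= this value
--
-- PAGES_NEAR_EDGE = 3     # How close to start/end to trigger edge display mode
--
-- def _link(p, current, is_category_page):
--     """Render one page element (current-page marker or link with its URL)."""
--     if p == current:
--         return f'<span class="pagination-current">{p}</span>'
--     if p == 1:
--         url = "../" if is_category_page else ("index.html" if current == 1 else "../../index.html")
--     elif current == 1:
--         url = f"../../page/{p}/"
--     else:
--         url = f"../{p}/"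
--     return f'<a href="{url}">{p}</a>'
--
-- def _render_page_numbers(current, total, is_category_page):
--     """Pick the ordered list of page numbers to show, then render it in one
--     pass, inserting an ellipsis wherever consecutive shown pages leave a gap."""
--     if total <= MAX_PAGES_SHOW_ALL:
--         pages = list(range(1, total + 1))
--     elif current <= PAGES_NEAR_EDGE:
--         pages = [1, 2, 3, 4, total]
--     elif current >= total - PAGES_NEAR_EDGE + 1:
--         pages = [1, total - 3, total - 2, total - 1, total]
--     else:
--         pages = [1, current - 1, current, current + 1, total]
--     out = []
--     prev = None
--     for p in pages:
--         if prev is not None and p - prev > 1: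
--             out.append('<span class="pagination-ellipsis">…</span>')
--         out.append(_link(p, current, is_category_page))
--         prev = p
--     return out
-- ===== Notes on version B (the rewrite author's own statement) =====
-- stated objective: simpler
-- what changed: Each branch now only selects the ordered list of page numbers to show; a single rendering pass inserts the ellipsis wherever consecutive shown pages differ by more than 1, instead of hardcoding ellipsis positions inline in every branch.
import Mathlib
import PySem

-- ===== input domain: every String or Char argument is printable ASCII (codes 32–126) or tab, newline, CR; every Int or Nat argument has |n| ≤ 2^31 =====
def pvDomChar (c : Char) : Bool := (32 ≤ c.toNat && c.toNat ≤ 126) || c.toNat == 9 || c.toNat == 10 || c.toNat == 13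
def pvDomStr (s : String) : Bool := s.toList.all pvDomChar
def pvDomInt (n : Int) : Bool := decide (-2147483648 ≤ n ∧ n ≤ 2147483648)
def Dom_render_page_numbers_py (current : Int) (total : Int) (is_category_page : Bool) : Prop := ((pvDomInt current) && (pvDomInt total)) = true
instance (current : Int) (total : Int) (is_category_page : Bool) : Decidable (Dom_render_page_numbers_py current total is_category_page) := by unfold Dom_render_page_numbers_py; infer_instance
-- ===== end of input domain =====

-- B picks each branch's ordered page list and renders it in one pass, inserting
-- the ellipsis from gaps between consecutive shown pages (objective: simpler decomposition).


-- ===== PORT A =====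
def pvBuildUrlA (page_num current : Int) (is_category_page : Bool) : String :=
  let is_on_first_page := current == 1
  if page_num == 1 then
    if is_category_page then "../"
    else if is_on_first_page then "index.html" else "../../index.html"
  else
    if is_on_first_page then "../../page/" ++ PySem.Int.toStr page_num ++ "/"
    else "../" ++ PySem.Int.toStr page_num ++ "/"

def pvRenderLinkA (page_num current : Int) (url : String) : String :=
  if page_num == current then
    "<span class=\"pagination-current\">" ++ PySem.Int.toStr page_num ++ "</span>"
  else
    "<a href=\"" ++ url ++ "\">" ++ PySem.Int.toStr page_num ++ "</a>"

def pvLinkA (current : Int) (is_category_page : Bool) (p : Int) : String :=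
  pvRenderLinkA p current (pvBuildUrlA p current is_category_page)

def pvEllipsis : String := "<span class=\"pagination-ellipsis\">…</span>"

def render_page_numbers_py (current : Int) (total : Int) (is_category_page : Bool) : List String :=
  if total ≤ 7 then
    (PySem.List.pyRange 1 (total + 1) 1).map (pvLinkA current is_category_page)
  else if current ≤ 3 then
    (PySem.List.pyRange 1 5 1).map (pvLinkA current is_category_page)
      ++ [pvEllipsis, pvLinkA current is_category_page total]
  else if current ≥ total - 3 + 1 then
    [pvLinkA current is_category_page 1, pvEllipsis]
      ++ (PySem.List.pyRange (total - 3) (total + 1) 1).map (pvLinkA current is_category_page)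
  else
    [pvLinkA current is_category_page 1, pvEllipsis]
      ++ (PySem.List.pyRange (current - 1) (current + 2) 1).map (pvLinkA current is_category_page)
      ++ [pvEllipsis, pvLinkA current is_category_page total]

-- ===== PORT B =====
def pvLinkB (p current : Int) (is_category_page : Bool) : String :=
  if p == current then
    "<span class=\"pagination-current\">" ++ PySem.Int.toStr p ++ "</span>"
  else
    let url :=
      if p == 1 then
        if is_category_page then "../"
        else if current == 1 then "index.html" else "../../index.html"
      else if current == 1 then "../../page/" ++ PySem.Int.toStr p ++ "/"
      else "../" ++ PySem.Int.toStr p ++ "/"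
    "<a href=\"" ++ url ++ "\">" ++ PySem.Int.toStr p ++ "</a>"

-- one loop step of Source B's rendering pass: state = (out, prev)
def pvStepB (current : Int) (is_category_page : Bool)
    (st : List String × Option Int) (p : Int) : List String × Option Int :=
  let out := match st.2 with
    | some q => if p - q > 1 then st.1 ++ [pvEllipsis] else st.1
    | none => st.1
  (out ++ [pvLinkB p current is_category_page], some p)

def render_page_numbers_py_alt (current : Int) (total : Int) (is_category_page : Bool) : List String :=
  let pages : List Int :=
    if total ≤ 7 then PySem.List.pyRange 1 (total + 1) 1
    else if current ≤ 3 then [1, 2, 3, 4, total]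
    else if current ≥ total - 3 + 1 then [1, total - 3, total - 2, total - 1, total]
    else [1, current - 1, current, current + 1, total]
  (pages.foldl (pvStepB current is_category_page) ([], none)).1

-- ===== PRECONDITION & SPEC =====
def Spec_render_page_numbers_py (current : Int) (total : Int) (is_category_page : Bool) (out : List String) : Prop := out = render_page_numbers_py_alt current total is_category_page
instance (current : Int) (total : Int) (is_category_page : Bool) (out : List String) : Decidable (Spec_render_page_numbers_py current total is_category_page out) := by unfold Spec_render_page_numbers_py; infer_instance

-- ===== CLAIM (what is proved, stated in full; the proofs are below) =====
def Claim_equal_render_page_numbers_py : Prop := ∀ (current : Int) (total : Int) (is_category_page : Bool), Dom_render_page_numbers_py current total is_category_page → Spec_render_page_numbers_py current total is_category_page (render_page_numbers_py current total is_category_page)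

-- ===== LEMMAS AND PROOFS =====
theorem linkB_eq_linkA (p current : Int) (cat : Bool) :
    pvLinkB p current cat = pvLinkA current cat p := by
  unfold pvLinkB pvLinkA pvRenderLinkA pvBuildUrlA
  by_cases h1 : p == current <;> by_cases h2 : p == 1 <;> by_cases h3 : cat <;>
    by_cases h4 : current == 1 <;> simp [h1, h2, h3, h4]

-- running Source B's pass over a consecutive run starting right after prev inserts no ellipsis
theorem gap_run (current : Int) (cat : Bool) :
    ∀ (n : ℕ) (a : Int) (out : List String),
      ((PySem.List.pyRange a (a + n) 1).foldl (pvStepB current cat) (out, some (a - 1))).1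
        = out ++ (PySem.List.pyRange a (a + n) 1).map (pvLinkA current cat) := by
  intro n
  induction n with
  | zero => intro a out; simp [PySem.List.pyRange_one_eq_nil (show a + ((0:ℕ):Int) ≤ a by omega)]
  | succ k ih =>
    intro a out
    rw [PySem.List.pyRange_one_cons (by push_cast; omega : a < a + ((k + 1 : ℕ) : Int))]
    have hstep : pvStepB current cat (out, some (a - 1)) a
        = (out ++ [pvLinkB a current cat], some a) := by
      simp [pvStepB, show ¬ (a - (a - 1) > 1) from by omega]
    have hrng : (a : Int) + ((k + 1 : ℕ) : Int) = (a + 1) + (k : ℕ) := by push_cast; omega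
    simp only [List.foldl_cons, hstep, hrng]
    have := ih (a + 1) (out ++ [pvLinkB a current cat])
    rw [show (a + 1 - 1 : Int) = a by omega] at this
    rw [this, linkB_eq_linkA]
    simp

theorem gap_run_from_none (current : Int) (cat : Bool) (a b : Int) :
    ((PySem.List.pyRange a b 1).foldl (pvStepB current cat) ([], none)).1
      = (PySem.List.pyRange a b 1).map (pvLinkA current cat) := by
  by_cases hab : b ≤ a
  · simp [PySem.List.pyRange_one_eq_nil hab]
  · rw [PySem.List.pyRange_one_cons (by omega : a < b)]
    have hstep : pvStepB current cat ([], none) a = ([pvLinkB a current cat], some a) := by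
      simp [pvStepB]
    simp only [List.foldl_cons, hstep]
    have hb : (a + 1 : Int) + ((b - (a + 1)).toNat : ℕ) = b := by omega
    have := gap_run current cat (b - (a + 1)).toNat (a + 1) [pvLinkB a current cat]
    rw [show (a + 1 - 1 : Int) = a by omega, hb] at this
    rw [this, linkB_eq_linkA]
    simp

-- ===== VERDICT (by name: the statement is the Claim_ definition above) =====
theorem render_page_numbers_py_spec : Claim_equal_render_page_numbers_py := by
  intro current total cat _
  unfold Spec_render_page_numbers_py render_page_numbers_py render_page_numbers_py_alt
  by_cases h1 : total ≤ 7
  · simp only [h1, if_pos]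
    exact (gap_run_from_none current cat 1 (total + 1)).symm
  · by_cases h2 : current ≤ 3
    · simp only [h1, h2, if_neg, if_pos, if_true]
      have : PySem.List.pyRange (1:Int) 5 1 = [1, 2, 3, 4] := by decide
      rw [this]
      simp [List.foldl, pvStepB, linkB_eq_linkA, show (total - 4 > 1) by omega]
    · by_cases h3 : current ≥ total - 3 + 1
      · simp only [h1, h2, h3, if_neg, if_pos, if_true]
        have : PySem.List.pyRange (total - 3) (total + 1) 1
            = [total - 3, total - 2, total - 1, total] := by
          rw [PySem.List.pyRange_one_cons (by omega), PySem.List.pyRange_one_cons (by omega),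
            PySem.List.pyRange_one_cons (by omega), PySem.List.pyRange_one_cons (by omega),
            PySem.List.pyRange_one_eq_nil (by omega)]
          norm_num
          omega
        rw [this]
        simp [List.foldl, pvStepB, linkB_eq_linkA, show (total - 3 - 1 > 1) by omega]
      · simp only [h1, h2, h3, if_neg, if_pos]
        have : PySem.List.pyRange (current - 1) (current + 2) 1
            = [current - 1, current, current + 1] := by
          rw [PySem.List.pyRange_one_cons (by omega), PySem.List.pyRange_one_cons (by omega),
            PySem.List.pyRange_one_cons (by omega), PySem.List.pyRange_one_eq_nil (by omega)]
          norm_num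
        rw [this]
        simp [List.foldl, pvStepB, linkB_eq_linkA,
          show (current - 1 - 1 > 1) by omega, show (total - (current + 1) > 1) by omega]
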